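-- pv_equiv track=rewrite | github.com/hwan1111/Coding-Test | 프로그래머스/unrated/120863. 다항식 더하기/다항식 더하기.py | solution
-- ===== SOURCE A (Python) =====
-- def solution(polynomial):
--     list0 = sorted(polynomial.split(' + '))
--     rank_x = 0
--     C = 0
--
--     for poly in list0:
--         if 'x' in poly:
--             if poly == 'x':
--                 rank_x += 1
--             elif poly == '-x':
--                 rank_x -= 1
--             else:
--                 rank_x += int(poly.replace('x', ''))
--         else:
--             C += int(poly)
--
--     if rank_x == 0 and C == 0:
--         return '0'
--     elif rank_x == 0 and C != 0:
--         return f'{C}'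
--     elif rank_x != 0 and C == 0:
--         if rank_x == 1:
--             return 'x'
--         else:
--             return f'{rank_x}x'
--     elif rank_x != 0 and C != 0:
--         if rank_x == 1:
--             if C > 0:
--                 return f'x + {C}'
--             else:
--                 return f'x - {-C}'
--         else:
--             if C > 0:
--                 return f'{rank_x}x + {C}'
--             else:
--                 return f'{rank_x}x - {-C}'
-- ===== SOURCE B (Python) =====
-- def _tally(terms):
--     if not terms:
--         return (0, 0)
--     r, c = _tally(terms[1:])
--     t = terms[0]
--     if 'x' in t:
--         b = t.replace('x', '')
--         return (r + int(b + '1' if b in ('', '-') else b), c)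
--     return (r, c + int(t))
--
--
-- def _fmt(r, c):
--     xs = '' if r == 0 else 'x' if r == 1 else f'{r}x'
--     if not xs:
--         return f'{c}'
--     if c == 0:
--         return xs
--     return f'{xs} + {c}' if c > 0 else f'{xs} - {-c}'
--
--
-- def solution(polynomial):
--     return _fmt(*_tally(polynomial.split(' + ')))
-- ===== Notes on version B (the rewrite author's own statement) =====
-- stated objective: simpler
-- what changed: B drops A's sort and replaces its imperative accumulator loop with a structural recursion over the term list; it parses sign-only coefficient strings by suffixing the digit one instead of A's two whole-term equality special cases, and formats by rendering the variable piece first and then attaching the signed constant, instead of A's 4-way nested return chain.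
import Mathlib
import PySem

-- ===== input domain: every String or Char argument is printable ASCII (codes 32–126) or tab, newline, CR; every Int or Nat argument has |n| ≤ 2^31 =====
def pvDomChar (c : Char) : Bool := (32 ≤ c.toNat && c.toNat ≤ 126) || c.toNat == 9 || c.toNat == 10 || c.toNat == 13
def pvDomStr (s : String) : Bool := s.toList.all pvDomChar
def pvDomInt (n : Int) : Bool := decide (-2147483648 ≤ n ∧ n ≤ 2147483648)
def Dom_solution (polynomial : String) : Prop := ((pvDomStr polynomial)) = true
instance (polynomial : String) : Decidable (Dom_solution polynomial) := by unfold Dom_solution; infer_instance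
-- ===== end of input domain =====

-- B drops A's sort, tallies the terms by structural recursion instead of an imperative loop,
-- parses sign-only coefficient strings by suffixing the digit one instead of A's whole-term
-- equality special cases, and formats by rendering the variable piece first (objective: simpler).

-- polynomial.split(' + '); the separator is a nonempty literal, so split? never returns none
def pvSplit (s : String) : List String := (PySem.Str.split? s " + ").getD []

-- ===== PORT A =====
def pvStepA (acc : Option (Int × Int)) (poly : String) : Option (Int × Int) :=
  match acc with
  | none => none
  | some (rank, c) =>
    if PySem.Str.isIn "x" poly then
      if poly = "x" then some (rank + 1, c)
      else if poly = "-x" then some (rank - 1, c)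
      else
        match PySem.Int.ofStr? (PySem.Str.replace poly "x" "") with
        | some v => some (rank + v, c)
        | none => none
    else
      match PySem.Int.ofStr? poly with
      | some v => some (rank, c + v)
      | none => none

-- A's return chain (none = int() raised in Python: unreachable under Pre_solution)
def pvRetA : Option (Int × Int) → String
  | none => ""
  | some (rank_x, C) =>
    if rank_x = 0 ∧ C = 0 then "0"
    else if rank_x = 0 ∧ C ≠ 0 then PySem.Int.toStr C
    else if rank_x ≠ 0 ∧ C = 0 then
      (if rank_x = 1 then "x" else PySem.Int.toStr rank_x ++ "x")
    else
      if rank_x = 1 then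
        (if C > 0 then "x + " ++ PySem.Int.toStr C else "x - " ++ PySem.Int.toStr (-C))
      else
        (if C > 0 then PySem.Int.toStr rank_x ++ "x + " ++ PySem.Int.toStr C
         else PySem.Int.toStr rank_x ++ "x - " ++ PySem.Int.toStr (-C))

def solution (polynomial : String) : String :=
  pvRetA ((PySem.List.sorted (pvSplit polynomial) (fun s => s) false).foldl pvStepA (some (0, 0)))

-- ===== PORT B =====
-- _tally: structural recursion over the term list (none = int() raised in Python)
def pvTallyB : List String → Option (Int × Int)
  | [] => some (0, 0)
  | t :: ts =>
    match pvTallyB ts with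
    | none => none
    | some (r, c) =>
      if PySem.Str.isIn "x" t then
        let b := PySem.Str.replace t "x" ""
        match PySem.Int.ofStr? (if b = "" ∨ b = "-" then b ++ "1" else b) with
        | some v => some (r + v, c)
        | none => none
      else
        match PySem.Int.ofStr? t with
        | some v => some (r, c + v)
        | none => none

-- _fmt
def pvFmtB (r c : Int) : String :=
  let xs := if r = 0 then "" else if r = 1 then "x" else PySem.Int.toStr r ++ "x"
  if xs = "" then PySem.Int.toStr c
  else if c = 0 then xs
  else if c > 0 then xs ++ " + " ++ PySem.Int.toStr c
  else xs ++ " - " ++ PySem.Int.toStr (-c)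

def solution_alt (polynomial : String) : String :=
  match pvTallyB (pvSplit polynomial) with
  | none => ""
  | some (r, c) => pvFmtB r c

-- ===== PRECONDITION & SPEC =====
-- Pre_ excludes exactly the inputs on which Python's int() raises ValueError (a term that is
-- neither the bare variable nor its bare negation and, after deleting the variable letter
-- where it occurs, is not a valid integer literal).
def Pre_solution (polynomial : String) : Prop :=
  ∀ t ∈ pvSplit polynomial,
    if PySem.Str.isIn "x" t then
      t = "x" ∨ t = "-x" ∨ (PySem.Int.ofStr? (PySem.Str.replace t "x" "")).isSome = true
    else (PySem.Int.ofStr? t).isSome = true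
instance (polynomial : String) : Decidable (Pre_solution polynomial) := by
  unfold Pre_solution; infer_instance

def pvWitness_solution : String := "3x + 7 + -x"

def Spec_solution (polynomial : String) (out : String) : Prop := out = solution_alt polynomial
instance (polynomial : String) (out : String) : Decidable (Spec_solution polynomial out) := by unfold Spec_solution; infer_instance

-- ===== CLAIM (what is proved, stated in full; the proofs are below) =====
def Claim_equal_solution : Prop := ∀ (polynomial : String), Dom_solution polynomial → Pre_solution polynomial → Spec_solution polynomial (solution polynomial)

-- ===== LEMMAS AND PROOFS =====

-- the per-term condition of Pre_solution, named for the proofs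
def pvTermPre (t : String) : Prop :=
  if PySem.Str.isIn "x" t then
    t = "x" ∨ t = "-x" ∨ (PySem.Int.ofStr? (PySem.Str.replace t "x" "")).isSome = true
  else (PySem.Int.ofStr? t).isSome = true

-- the per-term contribution, defined wherever pvTermPre holds
def pvG (t : String) : Int × Int :=
  if PySem.Str.isIn "x" t then
    if t = "x" then (1, 0)
    else if t = "-x" then (-1, 0)
    else ((PySem.Int.ofStr? (PySem.Str.replace t "x" "")).getD 0, 0)
  else (0, (PySem.Int.ofStr? t).getD 0)

-- A's step adds exactly the pvG contribution
theorem pvStepA_eq (t : String) (h : pvTermPre t) (r c : Int) :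
    pvStepA (some (r, c)) t = some (r + (pvG t).1, c + (pvG t).2) := by
  unfold pvTermPre at h
  simp only [pvStepA]
  by_cases hx : PySem.Str.isIn "x" t = true
  · simp only [hx, if_true] at h
    rw [if_pos hx]
    by_cases h1 : t = "x"
    · subst h1
      have hg : pvG "x" = (1, 0) := by decide
      rw [hg, if_pos rfl]
      norm_num
    · by_cases h2 : t = "-x"
      · subst h2
        have hg : pvG "-x" = (-1, 0) := by decide
        rw [hg, if_neg h1, if_pos rfl]
        have e : r - 1 = r + (-1, (0:Int)).1 := by omega
        rw [e]
        norm_num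
      · rcases h with h | h | h
        · exact absurd h h1
        · exact absurd h h2
        · rcases Option.isSome_iff_exists.mp h with ⟨v, hv⟩
          have hg : pvG t = (v, 0) := by
            unfold pvG
            rw [if_pos hx, if_neg h1, if_neg h2, hv]
            rfl
          rw [if_neg h1, if_neg h2, hv, hg]
          norm_num
  · simp only [Bool.not_eq_true] at hx
    simp only [hx] at h
    have hxn : ¬ PySem.Str.isIn "x" t = true := by rw [hx]; decide
    rcases Option.isSome_iff_exists.mp h with ⟨v, hv⟩
    have hg : pvG t = (0, v) := by
      unfold pvG
      rw [if_neg hxn, hv]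
      rfl
    rw [if_neg hxn, hv, hg]
    norm_num

-- B's recursion step: one unfolding of pvTallyB adds the same pvG contribution
theorem pvTallyB_cons (t : String) (ts : List String) (r c : Int)
    (hts : pvTallyB ts = some (r, c)) (h : pvTermPre t) :
    pvTallyB (t :: ts) = some (r + (pvG t).1, c + (pvG t).2) := by
  unfold pvTermPre at h
  rw [pvTallyB, hts]
  dsimp only
  by_cases hx : PySem.Str.isIn "x" t = true
  · simp only [hx, if_true] at h
    rw [if_pos hx]
    rcases h with h | h | h
    · subst h
      have hg : pvG "x" = (1, 0) := by decide
      have hv1 : PySem.Int.ofStr?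
          (if PySem.Str.replace "x" "x" "" = "" ∨ PySem.Str.replace "x" "x" "" = "-"
           then PySem.Str.replace "x" "x" "" ++ "1" else PySem.Str.replace "x" "x" "") = some 1 := by
        decide
      rw [hg]
      simp only [hv1]
      norm_num
    · subst h
      have hg : pvG "-x" = (-1, 0) := by decide
      have hv2 : PySem.Int.ofStr?
          (if PySem.Str.replace "-x" "x" "" = "" ∨ PySem.Str.replace "-x" "x" "" = "-"
           then PySem.Str.replace "-x" "x" "" ++ "1" else PySem.Str.replace "-x" "x" "") = some (-1) := by
        decide
      rw [hg]
      simp only [hv2]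
      norm_num
    · rcases Option.isSome_iff_exists.mp h with ⟨v, hv⟩
      have hb : PySem.Str.replace t "x" "" ≠ "" := by
        intro he
        have h0 : PySem.Int.ofStr? "" = none := by decide
        rw [he, h0] at hv; cases hv
      have hbm : PySem.Str.replace t "x" "" ≠ "-" := by
        intro he
        have h0 : PySem.Int.ofStr? "-" = none := by decide
        rw [he, h0] at hv; cases hv
      have ht1 : t ≠ "x" := by
        intro he; subst he; exact hb (by decide)
      have ht2 : t ≠ "-x" := by
        intro he; subst he; exact hbm (by decide)
      have hg : pvG t = (v, 0) := by
        unfold pvG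
        rw [if_pos hx, if_neg ht1, if_neg ht2, hv]
        rfl
      rw [hg]
      simp only [if_neg (show ¬(PySem.Str.replace t "x" "" = "" ∨ PySem.Str.replace t "x" "" = "-")
        from fun hh => hh.elim hb hbm), hv]
      norm_num
  · simp only [Bool.not_eq_true] at hx
    simp only [hx] at h
    have hxn : ¬ PySem.Str.isIn "x" t = true := by rw [hx]; decide
    rcases Option.isSome_iff_exists.mp h with ⟨v, hv⟩
    have hg : pvG t = (0, v) := by
      unfold pvG
      rw [if_neg hxn, hv]
      rfl
    rw [if_neg hxn]
    simp only [hv, hg]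
    norm_num

theorem pvFoldA (l : List String) (h : ∀ t ∈ l, pvTermPre t) (r c : Int) :
    l.foldl pvStepA (some (r, c)) =
      some (r + (l.map (fun t => (pvG t).1)).sum, c + (l.map (fun t => (pvG t).2)).sum) := by
  induction l generalizing r c with
  | nil => simp
  | cons t l ih =>
    have ht := h t (List.mem_cons_self ..)
    have hl : ∀ u ∈ l, pvTermPre u := fun u hu => h u (List.mem_cons_of_mem _ hu)
    simp only [List.foldl_cons, pvStepA_eq t ht r c, ih hl, List.map_cons, List.sum_cons]
    ring_nf

theorem pvTallyB_eq (l : List String) (h : ∀ t ∈ l, pvTermPre t) :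
    pvTallyB l = some ((l.map (fun t => (pvG t).1)).sum, (l.map (fun t => (pvG t).2)).sum) := by
  induction l with
  | nil => simp [pvTallyB]
  | cons t l ih =>
    have ht := h t (List.mem_cons_self ..)
    have hl : ∀ u ∈ l, pvTermPre u := fun u hu => h u (List.mem_cons_of_mem _ hu)
    rw [pvTallyB_cons t l _ _ (ih hl) ht]
    simp only [List.map_cons, List.sum_cons]
    ring_nf

theorem pvApp_plus' (R X : String) :
    R ++ "x + " ++ X = R ++ "x" ++ " + " ++ X := by
  apply String.toList_inj.mp
  simp [String.toList_append]

theorem pvApp_minus' (R X : String) :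
    R ++ "x - " ++ X = R ++ "x" ++ " - " ++ X := by
  apply String.toList_inj.mp
  simp [String.toList_append]

theorem pvX_plus (X : String) : "x + " ++ X = "x" ++ " + " ++ X := by
  apply String.toList_inj.mp
  simp [String.toList_append]

theorem pvX_minus (X : String) : "x - " ++ X = "x" ++ " - " ++ X := by
  apply String.toList_inj.mp
  simp [String.toList_append]

theorem pvToStr_append_x_ne (r : Int) : PySem.Int.toStr r ++ "x" ≠ "" := by
  intro h
  have := congrArg String.toList h
  simp [String.toList_append] at this

theorem pvFormat (r c : Int) : pvRetA (some (r, c)) = pvFmtB r c := by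
  unfold pvRetA pvFmtB
  dsimp only
  by_cases hr : r = 0
  · subst hr
    by_cases hc : c = 0
    · subst hc; decide
    · rw [if_pos (show (0:Int) = 0 from rfl), if_pos rfl,
        if_neg (show ¬((0:Int) = 0 ∧ c = 0) from fun h => hc h.2), if_pos ⟨rfl, hc⟩]
  · have hne : (if r = 1 then "x" else PySem.Int.toStr r ++ "x") ≠ "" := by
      by_cases h1 : r = 1
      · rw [if_pos h1]; decide
      · rw [if_neg h1]; exact pvToStr_append_x_ne r
    rw [if_neg hr, if_neg hne, if_neg (show ¬(r = 0 ∧ c = 0) from fun h => hr h.1),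
      if_neg (show ¬(r = 0 ∧ c ≠ 0) from fun h => hr h.1)]
    by_cases hc : c = 0
    · rw [if_pos (show r ≠ 0 ∧ c = 0 from ⟨hr, hc⟩), if_pos hc]
    · rw [if_neg (show ¬(r ≠ 0 ∧ c = 0) from fun h => hc h.2), if_neg hc]
      by_cases h1 : r = 1
      · rw [if_pos h1, if_pos h1]
        by_cases hp : c > 0
        · rw [if_pos hp, if_pos hp]; exact pvX_plus _
        · rw [if_neg hp, if_neg hp]; exact pvX_minus _
      · rw [if_neg h1, if_neg h1]
        by_cases hp : c > 0
        · rw [if_pos hp, if_pos hp]; exact pvApp_plus' _ _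
        · rw [if_neg hp, if_neg hp]; exact pvApp_minus' _ _

-- ===== VERDICT (by name: the statement is the Claim_ definition above) =====
theorem solution_spec : Claim_equal_solution := by
  intro polynomial _ hpre
  unfold Spec_solution solution solution_alt
  have hall : ∀ t ∈ pvSplit polynomial, pvTermPre t := fun t ht => hpre t ht
  have hperm : (PySem.List.sorted (pvSplit polynomial) (fun s => s) false).Perm (pvSplit polynomial) :=
    PySem.List.sorted_perm ..
  have hsall : ∀ t ∈ PySem.List.sorted (pvSplit polynomial) (fun s => s) false, pvTermPre t :=
    fun t ht => hall t (hperm.mem_iff.mp ht)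
  rw [pvFoldA _ hsall 0 0, pvTallyB_eq _ hall]
  have h1 : (0 : Int) + ((PySem.List.sorted (pvSplit polynomial) (fun s => s) false).map
        (fun t => (pvG t).1)).sum = ((pvSplit polynomial).map (fun t => (pvG t).1)).sum := by
    rw [zero_add]; exact (hperm.map _).sum_eq
  have h2 : (0 : Int) + ((PySem.List.sorted (pvSplit polynomial) (fun s => s) false).map
        (fun t => (pvG t).2)).sum = ((pvSplit polynomial).map (fun t => (pvG t).2)).sum := by
    rw [zero_add]; exact (hperm.map _).sum_eq
  rw [h1, h2]
  exact pvFormat _ _
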